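-- pv_equiv track=rewrite | github.com/MDJuniooor/Algorithm | test4.py | solution
-- ===== SOURCE A (Python) =====
-- from collections import defaultdict
--
-- def solution(A):
--     cnt = 1
--     while cnt<=len(A):
--         L = []
--         for i in range(0,len(A)-cnt+1):
--             seq = [A[i]]
--             for j in range(i+1,i+cnt):
--                 seq.append(A[j])
--             L.append(tuple(seq))
--         if len(L) == 1:
--             return cnt
--         else:
--             dic = defaultdict(lambda : None)
--             check = True
--             for i in range(0, len(A)-cnt+1):
--                 key = L[i]
--                 if i + cnt < len(A):
--                     if dic[key] != None and dic[key] != A[i+cnt]: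
--                         check = False
--                     else:
--                         dic[key] = A[i+cnt]
--             if check:
--                 return cnt
--         cnt+=1
--     return cnt
-- ===== SOURCE B (Python) =====
-- def solution(A):
--     # Answer = 1 + the largest window length that witnesses an ambiguity:
--     # a pair i<j with A[i:i+m] == A[j:j+m] and a differing next element A[i+m] != A[j+m].
--     # Such witness lengths are downward closed, so one global pairwise max replaces
--     # re-checking every candidate length from scratch.
--     n = len(A)
--     best = 0
--     for j in range(1, n):
--         for i in range(j):
--             m = 0
--             while j + m < n and A[i + m] == A[j + m]:
--                 m += 1
--             if j + m < n and m > best: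
--                 best = m
--     return best + 1
-- ===== Notes on version B (the rewrite author's own statement) =====
-- stated objective: alternative
-- what changed: A scans candidate window lengths cnt = 1,2,... and for each rebuilds every window and re-checks consistency with a dict latch; B instead computes, in one pairwise pass, the maximum common-prefix length at which two start positions still disagree on the next element (these witness lengths are downward closed) and returns that maximum plus one.
import Mathlib
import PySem

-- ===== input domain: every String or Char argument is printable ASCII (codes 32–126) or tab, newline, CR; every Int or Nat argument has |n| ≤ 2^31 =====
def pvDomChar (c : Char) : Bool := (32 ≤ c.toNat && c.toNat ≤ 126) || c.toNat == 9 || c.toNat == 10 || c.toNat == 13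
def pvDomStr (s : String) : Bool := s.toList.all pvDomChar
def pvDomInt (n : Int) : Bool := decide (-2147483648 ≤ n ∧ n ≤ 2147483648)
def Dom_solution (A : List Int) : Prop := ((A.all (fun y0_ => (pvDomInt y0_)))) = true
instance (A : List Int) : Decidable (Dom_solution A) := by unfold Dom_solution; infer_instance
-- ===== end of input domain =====

-- B changes the algorithm: instead of re-checking every candidate window length with a
-- dict of windows, it computes one global maximum of pairwise common-prefix lengths
-- that witness an ambiguity (objective: alternative).

-- ===== PORT A =====
-- seq = [A[i]]; for j in range(i+1, i+cnt): seq.append(A[j])  (indices provably in range where called)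
def buildSeqA (A : List Int) (i cnt : Int) : List Int :=
  (PySem.List.pyRange (i+1) (i+cnt) 1).foldl
    (fun seq j => seq ++ [PySem.List.pyGetD A j 0]) [PySem.List.pyGetD A i 0]

-- L = []; for i in range(0, len(A)-cnt+1): L.append(tuple(seq))  (a tuple of ints ports as List Int)
def buildLA (A : List Int) (cnt : Int) : List (List Int) :=
  (PySem.List.pyRange 0 (PySem.List.len A - cnt + 1) 1).foldl
    (fun L i => L ++ [buildSeqA A i cnt]) []

-- dic = defaultdict(lambda: None); the loop setting check.  Reading dic[key] inserts the
-- default None for a missing key, but that entry is immediately overwritten in the else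
-- branch and the dict is never iterated, so Dict.get? = none models the defaultdict read exactly.
def checkA (A : List Int) (cnt : Int) (L : List (List Int)) : Bool :=
  ((PySem.List.pyRange 0 (PySem.List.len A - cnt + 1) 1).foldl
    (fun (st : PySem.Dict (List Int) Int × Bool) i =>
      let key := PySem.List.pyGetD L i []
      if i + cnt < PySem.List.len A then
        match st.1.get? key with
        | some u =>
          if u ≠ PySem.List.pyGetD A (i+cnt) 0 then (st.1, false)
          else (st.1.insert key (PySem.List.pyGetD A (i+cnt) 0), st.2)
        | none => (st.1.insert key (PySem.List.pyGetD A (i+cnt) 0), st.2)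
      else st)
    (PySem.Dict.empty, true)).2

-- while cnt <= len(A): …  (fuel A.length+1 ≥ number of iterations; the loop body is verbatim)
def loopA (A : List Int) : Nat → Int → Int
  | 0, cnt => cnt
  | fuel+1, cnt =>
    if cnt ≤ PySem.List.len A then
      let L := buildLA A cnt
      if PySem.List.len L = 1 then cnt
      else if checkA A cnt L then cnt
      else loopA A fuel (cnt+1)
    else cnt

def solution (A : List Int) : Int := loopA A (A.length + 1) 1

-- ===== PORT B =====
-- m = 0; while j + m < n and A[i+m] == A[j+m]: m += 1   (fuel A.length ≥ iterations since j ≥ 1)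
def lcpScan (A : List Int) (i j : Int) : Nat → Int → Int
  | 0, m => m
  | fuel+1, m =>
    if j + m < PySem.List.len A ∧ PySem.List.pyGetD A (i+m) 0 = PySem.List.pyGetD A (j+m) 0
    then lcpScan A i j fuel (m+1) else m

def solution_alt (A : List Int) : Int :=
  (((PySem.List.pyRange 1 (PySem.List.len A) 1).foldl (fun best j =>
      (PySem.List.pyRange 0 j 1).foldl (fun best i =>
        let m := lcpScan A i j A.length 0
        if j + m < PySem.List.len A ∧ m > best then m else best) best) 0) : Int) + 1

-- ===== PRECONDITION & SPEC =====
def Spec_solution (A : List Int) (out : Int) : Prop := out = solution_alt A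
instance (A : List Int) (out : Int) : Decidable (Spec_solution A out) := by unfold Spec_solution; infer_instance

-- ===== CLAIM (what is proved, stated in full; the proofs are below) =====
def Claim_equal_solution : Prop := ∀ (A : List Int), Dom_solution A → Spec_solution A (solution A)

-- ===== LEMMAS AND PROOFS =====

def W (A : List Int) (i c : Nat) : List Int := (List.range c).map (fun k => A.getD (i+k) 0)

def PairC (A : List Int) (i j c : Nat) : Prop :=
  j + c < A.length ∧ W A i c = W A j c ∧ A.getD (i+c) 0 ≠ A.getD (j+c) 0

def Conf (A : List Int) (c : Nat) : Prop := ∃ i j : Nat, i < j ∧ PairC A i j c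

lemma W_eq_iff (A : List Int) (i j c : Nat) :
    W A i c = W A j c ↔ ∀ k < c, A.getD (i+k) 0 = A.getD (j+k) 0 := by
  simp [W, List.mem_range]

lemma PairC_pred (A : List Int) (i j c : Nat) (h : PairC A i j (c+1)) :
    PairC A (i+1) (j+1) c := by
  obtain ⟨hb, hw, hm⟩ := h
  rw [W_eq_iff] at hw
  unfold PairC
  rw [W_eq_iff]
  refine ⟨by omega, fun k hk => ?_, ?_⟩
  · have := hw (k+1) (by omega)
    convert this using 2 <;> omega
  · have : i + 1 + c = i + (c+1) := by omega
    rw [this, show j + 1 + c = j + (c+1) by omega]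
    exact hm

lemma Conf_mono (A : List Int) (c d : Nat) (h : Conf A c) (hd : d ≤ c) : Conf A d := by
  induction c with
  | zero => simpa [Nat.le_zero.mp hd] using h
  | succ m ih =>
    rcases Nat.lt_or_ge d (m+1) with h1 | h1
    · obtain ⟨i, j, hij, hp⟩ := h
      exact ih ⟨i+1, j+1, by omega, PairC_pred A i j m hp⟩ (by omega)
    · have : d = m + 1 := by omega
      subst this; exact h

lemma buildSeqA_eq (A : List Int) (i c : Nat) (hc : 1 ≤ c) :
    buildSeqA A (i:Int) (c:Int) = W A i c := by
  obtain ⟨m, rfl⟩ : ∃ m, c = m + 1 := ⟨c - 1, by omega⟩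
  unfold buildSeqA
  rw [PySem.List.pyRange_one, PySem.List.foldl_append_singleton_eq_map]
  have h1 : ((i:Int) + ((m+1:Nat):Int) - ((i:Int)+1)).toNat = m := by push_cast; omega
  rw [h1, List.map_map]
  unfold W
  rw [List.range_succ_eq_map, List.map_cons, List.map_map]
  simp only [List.cons_eq_cons, List.singleton_append]
  constructor
  · simp
  · apply List.map_congr_left
    intro k hk
    simp only [Function.comp]
    have : (i:Int) + 1 + (k:Int) = ((i + (k+1) : Nat) : Int) := by push_cast; ring
    rw [this, PySem.List.pyGetD_natCast]

lemma buildLA_eq (A : List Int) (c : Nat) (hc : 1 ≤ c) (hcn : c ≤ A.length) :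
    buildLA A (c:Int) = (List.range (A.length - c + 1)).map (fun i => W A i c) := by
  unfold buildLA
  rw [PySem.List.foldl_append_singleton_eq_map]
  simp only [PySem.List.len_eq]
  rw [PySem.List.pyRange_one]
  have h1 : ((A.length:Int) - (c:Int) + 1 - 0).toNat = A.length - c + 1 := by omega
  rw [h1, List.map_map, List.nil_append]
  apply List.map_congr_left
  intro k hk
  simp only [Function.comp]
  rw [show (0:Int) + (k:Int) = ((k:Nat):Int) by ring]
  exact buildSeqA_eq A k c hc

def stepN (A : List Int) (c : Nat) (st : PySem.Dict (List Int) Int × Bool) (k : Nat) :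
    PySem.Dict (List Int) Int × Bool :=
  if k + c < A.length then
    match st.1.get? (W A k c) with
    | some u =>
      if u ≠ A.getD (k+c) 0 then (st.1, false)
      else (st.1.insert (W A k c) (A.getD (k+c) 0), st.2)
    | none => (st.1.insert (W A k c) (A.getD (k+c) 0), st.2)
  else st

lemma checkA_eq_foldN (A : List Int) (c : Nat) (hc : 1 ≤ c) (hcn : c ≤ A.length) :
    checkA A (c:Int) (buildLA A (c:Int)) =
      ((List.range (A.length - c + 1)).foldl (stepN A c) (PySem.Dict.empty, true)).2 := by
  unfold checkA
  rw [buildLA_eq A c hc hcn]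
  simp only [PySem.List.len_eq]
  rw [PySem.List.pyRange_one]
  have h1 : ((A.length:Int) - (c:Int) + 1 - 0).toNat = A.length - c + 1 := by omega
  rw [h1, List.foldl_map]
  congr 1
  apply PySem.List.foldl_congr_mem
  intro st k hk
  rw [List.mem_range] at hk
  have hkey : PySem.List.pyGetD ((List.range (A.length - c + 1)).map (fun i => W A i c)) (0 + (k:Int)) [] = W A k c := by
    rw [show (0:Int) + (k:Int) = ((k:Nat):Int) by ring, PySem.List.pyGetD_natCast]
    rw [List.getD_eq_getElem?_getD]
    simp [hk]
  rw [hkey]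
  have hidx : (0:Int) + (k:Int) + (c:Int) = ((k+c : Nat) : Int) := by push_cast; ring
  rw [hidx, PySem.List.pyGetD_natCast]
  unfold stepN
  by_cases hg : k + c < A.length
  · rw [if_pos (by exact_mod_cast hg), if_pos hg]
  · rw [if_neg (by exact_mod_cast hg), if_neg hg]

def firstW (A : List Int) (c k : Nat) (w : List Int) : Option Nat :=
  (List.range k).find? (fun i => W A i c == w)

def Qk (A : List Int) (c k : Nat) : Prop :=
  ∃ i j : Nat, i < j ∧ j < k ∧ W A i c = W A j c ∧ A.getD (i+c) 0 ≠ A.getD (j+c) 0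

lemma firstW_succ (A : List Int) (c k : Nat) (w : List Int) :
    firstW A c (k+1) w =
      (firstW A c k w).or (if W A k c = w then some k else none) := by
  unfold firstW
  rw [List.range_succ, List.find?_append]
  congr 1
  split_ifs with h
  · simp [h]
  · simp [h]

lemma firstW_spec (A : List Int) (c k f : Nat) (h : firstW A c k w = some f) :
    f < k ∧ W A f c = w ∧ ∀ i < f, W A i c ≠ w := by
  unfold firstW at h
  rw [List.find?_eq_some_iff_append] at h
  obtain ⟨hp, l1, l2, hsplit, hmin⟩ := h
  have hbeq : W A f c = w := by simpa using hp
  have hlen : l1.length + 1 ≤ k := by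
    have := congrArg List.length hsplit
    simp at this; omega
  have hf : f = l1.length := by
    have := congrArg (fun l => l[l1.length]?) hsplit
    simp [List.getElem?_range (show l1.length < k by omega)] at this
    omega
  have hl1 : l1 = List.range l1.length := by
    have := congrArg (fun l => l.take l1.length) hsplit
    simp [List.take_range, List.take_append_of_le_length (le_refl l1.length)] at this
    rw [show min l1.length k = l1.length by omega] at this
    exact this.symm
  refine ⟨by omega, hbeq, fun i hi hwi => ?_⟩
  have : i ∈ l1 := by rw [hl1, List.mem_range]; omega
  have := hmin i this
  simp [hwi] at this

lemma foldN_inv (A : List Int) (c : Nat) :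
    ∀ k : Nat, k + c ≤ A.length →
      (∀ w, ((List.range k).foldl (stepN A c) (PySem.Dict.empty, true)).1.get? w
          = (firstW A c k w).map (fun f => A.getD (f+c) 0))
      ∧ (((List.range k).foldl (stepN A c) (PySem.Dict.empty, true)).2 = true ↔ ¬ Qk A c k) := by
  intro k
  induction k with
  | zero =>
    intro _
    constructor
    · intro w; simp [firstW, PySem.Dict.get?_empty]
    · simp [Qk]
  | succ k ih =>
    intro hk
    obtain ⟨ihd, ihc⟩ := ih (by omega)
    set st := (List.range k).foldl (stepN A c) (PySem.Dict.empty, true) with hst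
    have hsplit : (List.range (k+1)).foldl (stepN A c) (PySem.Dict.empty, true) = stepN A c st k := by
      rw [List.range_succ, List.foldl_append, List.foldl_cons, List.foldl_nil]
    rw [hsplit]
    have hg : k + c < A.length := by omega
    have hQsame_of_nofresh :
        (∀ i < k, W A i c ≠ W A k c) → (Qk A c (k+1) ↔ Qk A c k) := by
      intro hno
      constructor
      · rintro ⟨i, j, hij, hjk, hw, hm⟩
        rcases Nat.lt_or_ge j k with h | h
        · exact ⟨i, j, hij, h, hw, hm⟩
        · exfalso; have : j = k := by omega
          subst this; exact hno i hij hw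
      · rintro ⟨i, j, hij, hjk, hw, hm⟩; exact ⟨i, j, hij, by omega, hw, hm⟩
    unfold stepN
    rw [if_pos hg]
    rcases hget : st.1.get? (W A k c) with _ | u
    -- fresh key
    · have hnone : firstW A c k (W A k c) = none := by
        have h2 := ihd (W A k c); rw [hget] at h2
        cases hfw : firstW A c k (W A k c) with
        | none => rfl
        | some f => rw [hfw] at h2; simp at h2
      have hnofresh : ∀ i < k, W A i c ≠ W A k c := by
        intro i hi hwi
        unfold firstW at hnone
        rw [List.find?_eq_none] at hnone
        have h3 := hnone i (by rw [List.mem_range]; omega)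
        simp [hwi] at h3
      constructor
      · intro w
        rw [PySem.Dict.get?_insert, firstW_succ]
        by_cases hw : w = W A k c
        · subst hw
          rw [if_pos rfl, hnone]
          simp
        · rw [if_neg hw, ihd w]
          have h4 : (if W A k c = w then some k else none) = none := by
            rw [if_neg (fun h => hw h.symm)]
          rw [h4, Option.or_none]
      · simpa [hQsame_of_nofresh hnofresh] using ihc
    -- key present, first occurrence f
    · have hsome : ∃ f, firstW A c k (W A k c) = some f ∧ A.getD (f+c) 0 = u := by
        have h2 := ihd (W A k c); rw [hget] at h2
        cases hfw : firstW A c k (W A k c) with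
        | none => rw [hfw] at h2; simp at h2
        | some f => rw [hfw] at h2; simp at h2; exact ⟨f, rfl, h2.symm⟩
      obtain ⟨f, hfw, hfu⟩ := hsome
      obtain ⟨hfk, hfW, hfmin⟩ := firstW_spec A c k f hfw
      have hfw_same : ∀ w, (firstW A c (k+1) w) = if w = W A k c then some f else firstW A c k w := by
        intro w
        rw [firstW_succ]
        by_cases hw : w = W A k c
        · subst hw; rw [if_pos rfl, hfw]; simp
        · rw [if_neg hw, if_neg (fun h => hw h.symm), Option.or_none]
      dsimp only
      by_cases hu : u = A.getD (k+c) 0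
      -- consistent: insert same value, check unchanged
      · rw [if_neg (not_not_intro hu)]
        constructor
        · intro w
          rw [PySem.Dict.get?_insert, hfw_same w]
          by_cases hw : w = W A k c
          · subst hw
            rw [if_pos rfl, if_pos rfl]
            simp only [Option.map_some]
            rw [← hu, hfu]
          · rw [if_neg hw, if_neg hw, ihd w]
        · rw [show ((st.1, st.2) : PySem.Dict (List Int) Int × Bool).2 = st.2 from rfl] at ihc
          simp only []
          rw [ihc]
          constructor
          · intro hnq hq
            obtain ⟨i, j, hij, hjk, hw, hm⟩ := hq
            rcases Nat.lt_or_ge j k with h | h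
            · exact hnq ⟨i, j, hij, h, hw, hm⟩
            · have hjeq : j = k := by omega
              subst hjeq
              have hine : i ≠ f := by
                intro h; subst h
                exact hm (by rw [hfu]; exact hu)
              have hfi : f < i := by
                rcases Nat.lt_or_ge i f with h2 | h2
                · exact absurd hw (hfmin i h2)
                · omega
              refine hnq ⟨f, i, hfi, hij, by rw [hfW, hw], ?_⟩
              rw [hfu, hu]
              exact fun h => hm h.symm
          · intro hnq hq
            obtain ⟨i, j, hij, hjk, hw, hm⟩ := hq
            exact hnq ⟨i, j, hij, by omega, hw, hm⟩
      -- conflict: check goes false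
      · rw [if_pos hu]
        constructor
        · intro w
          rw [show ((st.1, false) : PySem.Dict (List Int) Int × Bool).1 = st.1 from rfl, ihd w, hfw_same w]
          by_cases hw : w = W A k c
          · subst hw; rw [if_pos rfl, hfw]
          · rw [if_neg hw]
        · simp only [false_iff, Bool.false_eq_true, not_not]
          exact ⟨f, k, hfk, by omega, hfW, by rw [hfu]; exact hu⟩

lemma check_iff (A : List Int) (c : Nat) (hc : 1 ≤ c) (hcn : c ≤ A.length) :
    (checkA A (c:Int) (buildLA A (c:Int)) = true) ↔ ¬ Conf A c := by
  rw [checkA_eq_foldN A c hc hcn, List.range_succ, List.foldl_append, List.foldl_cons,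
    List.foldl_nil]
  have hnoop : stepN A c ((List.range (A.length-c)).foldl (stepN A c) (PySem.Dict.empty, true))
      (A.length - c) = (List.range (A.length-c)).foldl (stepN A c) (PySem.Dict.empty, true) := by
    unfold stepN; rw [if_neg (by omega)]
  rw [hnoop, (foldN_inv A c (A.length - c) (by omega)).2]
  have hQC : Qk A c (A.length - c) ↔ Conf A c := by
    constructor
    · rintro ⟨i, j, hij, hjk, hw, hm⟩; exact ⟨i, j, hij, by omega, hw, hm⟩
    · rintro ⟨i, j, hij, hb, hw, hm⟩; exact ⟨i, j, hij, by omega, hw, hm⟩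
  rw [hQC]

lemma len_buildLA (A : List Int) (c : Nat) (hc : 1 ≤ c) (hcn : c ≤ A.length) :
    PySem.List.len (buildLA A (c:Int)) = ((A.length - c + 1 : Nat) : Int) := by
  rw [buildLA_eq A c hc hcn]
  simp [PySem.List.len_eq]

lemma loopA_reaches (A : List Int) :
    ∀ (fuel c t : Nat), 1 ≤ c → c ≤ t → t ≤ A.length → t - c < fuel →
      (∀ d : Nat, c ≤ d → d < t → Conf A d) →
      (t = A.length ∨ ¬ Conf A t) →
      loopA A fuel (c:Int) = (t:Int) := by
  intro fuel
  induction fuel with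
  | zero => intro c t _ _ _ h _ _; omega
  | succ f ih =>
    intro c t hc hct htn hfuel hfail hgood
    unfold loopA
    dsimp only
    rw [if_pos (show (c:Int) ≤ PySem.List.len A by
      simp only [PySem.List.len_eq]; exact_mod_cast le_trans hct htn)]
    rw [len_buildLA A c hc (le_trans hct htn)]
    by_cases hcn : c = A.length
    · have ht : t = c := by omega
      rw [if_pos (by rw [hcn]; norm_num)]
      rw [ht]
    · have hcltn : c < A.length := by omega
      rw [if_neg (by
        have : (2:Nat) ≤ A.length - c + 1 := by omega
        intro h
        have : ((A.length - c + 1 : Nat) : Int) = 1 := h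
        omega)]
      by_cases hctarget : c = t
      · have hnc : ¬ Conf A c := by
          rcases hgood with h | h
          · exact absurd (hctarget.trans h) hcn
          · rw [hctarget]; exact h
        rw [if_pos ((check_iff A c hc (le_of_lt hcltn)).2 hnc), hctarget]
      · have hconf : Conf A c := hfail c le_rfl (by omega)
        rw [if_neg (by
          intro h
          exact ((check_iff A c hc (le_of_lt hcltn)).1 h) hconf)]
        rw [show (c:Int) + 1 = ((c+1 : Nat) : Int) by push_cast; ring]
        exact ih (c+1) t (by omega) (by omega) htn (by omega)
          (fun d hd1 hd2 => hfail d (by omega) hd2) hgood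

lemma lcpScan_spec (A : List Int) (i j : Nat) :
    ∀ (fuel m : Nat), A.length ≤ j + m + fuel → j + m ≤ A.length →
      ∃ m' : Nat, lcpScan A (i:Int) (j:Int) fuel (m:Int) = (m':Int) ∧ m ≤ m' ∧
        j + m' ≤ A.length ∧
        (∀ k : Nat, m ≤ k → k < m' → A.getD (i+k) 0 = A.getD (j+k) 0) ∧
        (j + m' < A.length → A.getD (i+m') 0 ≠ A.getD (j+m') 0) := by
  intro fuel
  induction fuel with
  | zero =>
    intro m h1 h2
    exact ⟨m, rfl, le_rfl, h2, fun k hk1 hk2 => absurd hk2 (by omega),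
      fun h => absurd h (by omega)⟩
  | succ f ihf =>
    intro m h1 h2
    unfold lcpScan
    simp only [PySem.List.len_eq]
    rw [show (i:Int) + (m:Int) = ((i+m : Nat) : Int) by push_cast; ring,
        show (j:Int) + (m:Int) = ((j+m : Nat) : Int) by push_cast; ring,
        PySem.List.pyGetD_natCast, PySem.List.pyGetD_natCast]
    by_cases hcond : j + m < A.length ∧ A.getD (i+m) 0 = A.getD (j+m) 0
    · rw [if_pos ⟨by exact_mod_cast hcond.1, hcond.2⟩]
      rw [show ((m:Int)) + 1 = ((m+1 : Nat) : Int) by push_cast; ring]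
      obtain ⟨m', heq, hmm, hle, hpre, hmis⟩ := ihf (m+1) (by omega) (by omega)
      refine ⟨m', heq, by omega, hle, fun k hk1 hk2 => ?_, hmis⟩
      rcases Nat.eq_or_lt_of_le hk1 with h | h
      · rw [← h]; exact hcond.2
      · exact hpre k (by omega) hk2
    · rw [if_neg (fun h => hcond ⟨by exact_mod_cast h.1, h.2⟩)]
      refine ⟨m, rfl, le_rfl, h2, fun k hk1 hk2 => absurd hk2 (by omega), fun hlt => ?_⟩
      intro heq
      exact hcond ⟨hlt, heq⟩

lemma pair_lcp (A : List Int) (i j : Nat) (hjn : j ≤ A.length) :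
    ∃ m' : Nat, lcpScan A (i:Int) (j:Int) A.length 0 = (m':Int) ∧ j + m' ≤ A.length ∧
      ∀ c : Nat, PairC A i j c ↔ (c = m' ∧ j + m' < A.length) := by
  obtain ⟨m', heq, _, hle, hpre, hmis⟩ := lcpScan_spec A i j A.length 0 (by omega) (by omega)
  refine ⟨m', heq, hle, fun c => ⟨?_, ?_⟩⟩
  · rintro ⟨hb, hw, hm⟩
    rw [W_eq_iff] at hw
    have hcm : c = m' := by
      rcases Nat.lt_trichotomy c m' with h | h | h
      · exact absurd (hpre c (by omega) h) hm
      · exact h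
      · exact absurd (hw m' h) (hmis (by omega))
    exact ⟨hcm, by omega⟩
  · rintro ⟨rfl, hlt⟩
    exact ⟨hlt, (W_eq_iff A i j c).2 (fun k hk => hpre k (by omega) hk), hmis hlt⟩

def innerStep (A : List Int) (j : Nat) (b : Int) (i : Nat) : Int :=
  let m := lcpScan A (i:Int) (j:Int) A.length 0
  if (j:Int) + m < (A.length:Int) ∧ m > b then m else b

def outerF (A : List Int) (b : Int) (k : Nat) : Int :=
  (List.range (k+1)).foldl (innerStep A (k+1)) b

lemma solution_alt_eq (A : List Int) :
    solution_alt A = (List.range (A.length - 1)).foldl (outerF A) 0 + 1 := by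
  unfold solution_alt
  simp only [PySem.List.len_eq]
  rw [PySem.List.pyRange_one]
  have h1 : ((A.length:Int) - 1).toNat = A.length - 1 := by omega
  rw [h1, List.foldl_map]
  congr 1
  apply PySem.List.foldl_congr_mem
  intro b k hk
  unfold outerF
  rw [show (1:Int) + (k:Int) = ((k+1 : Nat) : Int) by push_cast; ring]
  rw [PySem.List.pyRange_one, List.foldl_map]
  have h2 : (((k+1 : Nat) : Int) - 0).toNat = k + 1 := by omega
  rw [h2]
  apply PySem.List.foldl_congr_mem
  intro b' i hi
  unfold innerStep
  rw [show (0:Int) + (i:Int) = ((i : Nat) : Int) by ring]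
  rfl

lemma inner_inv (A : List Int) (j : Nat) (hj : j < A.length) :
    ∀ (I : Nat) (b : Int), I ≤ j →
      b ≤ (List.range I).foldl (innerStep A j) b ∧
      (∀ i c : Nat, i < I → PairC A i j c → (c:Int) ≤ (List.range I).foldl (innerStep A j) b) ∧
      ((List.range I).foldl (innerStep A j) b = b ∨
        ∃ i c : Nat, i < I ∧ PairC A i j c ∧ (c:Int) = (List.range I).foldl (innerStep A j) b) := by
  intro I
  induction I with
  | zero =>
    intro b _
    exact ⟨le_rfl, fun i c hi => absurd hi (by omega), Or.inl rfl⟩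
  | succ I ih =>
    intro b hI
    obtain ⟨hb, hall, hex⟩ := ih b (by omega)
    rw [List.range_succ, List.foldl_append, List.foldl_cons, List.foldl_nil]
    set r := (List.range I).foldl (innerStep A j) b with hr
    obtain ⟨m', heq, hle, hiff⟩ := pair_lcp A I j (by omega)
    unfold innerStep
    simp only [heq]
    by_cases hguard : (j:Int) + (m':Int) < (A.length:Int) ∧ (m':Int) > r
    · rw [if_pos hguard]
      refine ⟨by omega, fun i c hi hp => ?_,
        Or.inr ⟨I, m', by omega, (hiff m').2 ⟨rfl, by exact_mod_cast hguard.1⟩, rfl⟩⟩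
      rcases Nat.lt_or_ge i I with h | h
      · have := hall i c h hp; omega
      · have hiI : i = I := by omega
        subst hiI
        have := (hiff c).1 hp
        omega
    · rw [if_neg hguard]
      refine ⟨hb, fun i c hi hp => ?_,
        hex.imp id (fun ⟨i0, c0, hi0, hp0, hc0⟩ => ⟨i0, c0, by omega, hp0, hc0⟩)⟩
      rcases Nat.lt_or_ge i I with h | h
      · exact hall i c h hp
      · have hiI : i = I := by omega
        subst hiI
        obtain ⟨hcm, hlt⟩ := (hiff c).1 hp
        subst hcm
        by_contra hgt
        exact hguard ⟨by exact_mod_cast hlt, by omega⟩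

lemma outer_inv (A : List Int) :
    ∀ (J : Nat), J + 1 ≤ A.length →
      0 ≤ (List.range J).foldl (outerF A) 0 ∧
      (∀ i j c : Nat, j < J + 1 → i < j → PairC A i j c →
        (c:Int) ≤ (List.range J).foldl (outerF A) 0) ∧
      ((List.range J).foldl (outerF A) 0 = 0 ∨
        ∃ i j c : Nat, j < J + 1 ∧ i < j ∧ PairC A i j c ∧
          (c:Int) = (List.range J).foldl (outerF A) 0) := by
  intro J
  induction J with
  | zero =>
    intro _
    exact ⟨le_rfl, fun i j c hj hij _ => by omega, Or.inl rfl⟩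
  | succ J ih =>
    intro hJ
    obtain ⟨h0, hall, hex⟩ := ih (by omega)
    rw [List.range_succ, List.foldl_append, List.foldl_cons, List.foldl_nil]
    set r := (List.range J).foldl (outerF A) 0 with hr
    unfold outerF
    obtain ⟨hmono, hall2, hex2⟩ := inner_inv A (J+1) (by omega) (J+1) r le_rfl
    refine ⟨le_trans h0 hmono, ?_, ?_⟩
    · intro i j c hj hij hp
      rcases Nat.lt_or_ge j (J+1) with h | h
      · exact le_trans (hall i j c h hij hp) hmono
      · have hjJ : j = J + 1 := by omega
        subst hjJ
        exact hall2 i c hij hp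
    · rcases hex2 with h | ⟨i, c, hi, hp, hc⟩
      · rw [h]
        rcases hex with h2 | ⟨i, j, c, hj, hij, hp, hc⟩
        · exact Or.inl h2
        · exact Or.inr ⟨i, j, c, by omega, hij, hp, hc⟩
      · exact Or.inr ⟨i, J+1, c, by omega, by omega, hp, hc⟩

-- ===== VERDICT (by name: the statement is the Claim_ definition above) =====
theorem solution_spec : Claim_equal_solution := by
  unfold Claim_equal_solution Spec_solution
  intro A _
  rw [solution_alt_eq]
  by_cases hn : A.length = 0
  · have hA : A = [] := List.length_eq_zero_iff.mp hn
    subst hA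
    rfl
  · have hn1 : 1 ≤ A.length := by omega
    obtain ⟨h0, hall, hex⟩ := outer_inv A (A.length - 1) (by omega)
    have hJ : A.length - 1 + 1 = A.length := by omega
    rw [hJ] at hall hex
    obtain ⟨bN, hbN⟩ := Int.eq_ofNat_of_zero_le h0
    rw [hbN] at hall hex ⊢
    have hallC : ∀ c : Nat, Conf A c → c ≤ bN := by
      rintro c ⟨i, j, hij, hp⟩
      have h2 := hall i j c (by obtain ⟨hb, _, _⟩ := hp; omega) hij hp
      exact_mod_cast h2
    have ht_le : bN + 1 ≤ A.length := by
      rcases hex with h | ⟨i, j, c, hj, hij, hp, hc⟩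
      · have : bN = 0 := by exact_mod_cast h
        omega
      · obtain ⟨hb, _, _⟩ := hp
        have hc' : c = bN := by exact_mod_cast hc
        omega
    have hgood : (bN + 1 = A.length) ∨ ¬ Conf A (bN + 1) :=
      Or.inr (fun h => by have := hallC (bN+1) h; omega)
    have hfail : ∀ d : Nat, 1 ≤ d → d < bN + 1 → Conf A d := by
      intro d hd1 hd2
      rcases hex with h | ⟨i, j, c, hj, hij, hp, hc⟩
      · have : bN = 0 := by exact_mod_cast h
        omega
      · have hc' : c = bN := by exact_mod_cast hc
        exact Conf_mono A bN d (hc' ▸ ⟨i, j, hij, hp⟩) (by omega)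
    have hmain := loopA_reaches A (A.length + 1) 1 (bN + 1) le_rfl (by omega) ht_le
      (by omega) hfail hgood
    unfold solution
    rw [show ((1:Nat):Int) = (1:Int) by norm_num] at hmain
    rw [hmain]
    push_cast
    ring
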